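-- pv_equiv track=rewrite | github.com/ketsonroberto/PBDO | Optimization.py | fitness_similarity_chech
-- ===== SOURCE A (Python) =====
-- def fitness_similarity_chech(max_fitness, number_of_similarity):
--     result = False
--     similarity = 0
--     for n in range(len(max_fitness) - 1):
--         if max_fitness[n] == max_fitness[n + 1]:
--             similarity += 1
--         else:
--             similarity = 0
--     if similarity == number_of_similarity - 1:
--         result = True
--     return result
-- ===== SOURCE B (Python) =====
-- def fitness_similarity_chech(max_fitness, number_of_similarity):
--     # Scan backward over the trailing run of equal values only, stopping at the
--     # first mismatch, instead of A's full forward pass with resets.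
--     similarity = 0
--     i = len(max_fitness) - 1
--     while i > 0 and max_fitness[i] == max_fitness[i - 1]:
--         similarity += 1
--         i -= 1
--     return similarity == number_of_similarity - 1
-- ===== Notes on version B (the rewrite author's own statement) =====
-- stated objective: faster
-- what changed: Replaces A's full forward pass with reset-to-zero counting by a backward scan from the last element that counts only the trailing run of equal values and stops at the first mismatch.
import Mathlib
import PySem

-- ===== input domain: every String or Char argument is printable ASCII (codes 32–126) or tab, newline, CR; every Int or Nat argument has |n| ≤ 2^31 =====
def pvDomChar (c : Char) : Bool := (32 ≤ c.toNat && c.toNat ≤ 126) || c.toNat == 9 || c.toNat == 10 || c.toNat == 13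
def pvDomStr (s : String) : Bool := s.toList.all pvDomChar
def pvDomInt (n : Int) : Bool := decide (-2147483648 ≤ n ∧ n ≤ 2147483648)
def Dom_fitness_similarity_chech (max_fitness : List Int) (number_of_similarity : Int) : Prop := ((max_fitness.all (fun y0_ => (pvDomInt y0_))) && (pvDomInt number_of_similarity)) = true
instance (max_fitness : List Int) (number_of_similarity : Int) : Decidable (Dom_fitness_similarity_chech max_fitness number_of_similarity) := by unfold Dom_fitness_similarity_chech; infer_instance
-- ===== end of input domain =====

-- B replaces A's full forward reset-counting pass by a backward scan over the trailing
-- run of equal values that stops at the first mismatch (objective: alternative).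

-- ===== PORT A =====
-- for n in range(len(max_fitness)-1): similarity += 1 on equal neighbours, else reset to 0
def fitness_similarity_chech (max_fitness : List Int) (number_of_similarity : Int) : Bool :=
  let similarity : Int :=
    (PySem.List.pyRange 0 (PySem.List.len max_fitness - 1) 1).foldl
      (fun sim n =>
        if PySem.List.pyGetD max_fitness n 0 = PySem.List.pyGetD max_fitness (n + 1) 0
        then sim + 1 else 0) 0
  if similarity = number_of_similarity - 1 then true else false

-- ===== PORT B =====
-- while i > 0 and max_fitness[i] == max_fitness[i-1]: similarity += 1; i -= 1
def fscAltLoop (max_fitness : List Int) : Nat → Int → Int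
  | i + 1, sim =>
      if PySem.List.pyGetD max_fitness ((i : Int) + 1) 0 = PySem.List.pyGetD max_fitness (i : Int) 0
      then fscAltLoop max_fitness i (sim + 1)
      else sim
  | 0, sim => sim

def fitness_similarity_chech_alt (max_fitness : List Int) (number_of_similarity : Int) : Bool :=
  decide (fscAltLoop max_fitness (max_fitness.length - 1) 0 = number_of_similarity - 1)

-- ===== PRECONDITION & SPEC =====
def Spec_fitness_similarity_chech (max_fitness : List Int) (number_of_similarity : Int) (out : Bool) : Prop := out = fitness_similarity_chech_alt max_fitness number_of_similarity
instance (max_fitness : List Int) (number_of_similarity : Int) (out : Bool) : Decidable (Spec_fitness_similarity_chech max_fitness number_of_similarity out) := by unfold Spec_fitness_similarity_chech; infer_instance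

-- ===== CLAIM (what is proved, stated in full; the proofs are below) =====
def Claim_equal_fitness_similarity_chech : Prop := ∀ (max_fitness : List Int) (number_of_similarity : Int), Dom_fitness_similarity_chech max_fitness number_of_similarity → Spec_fitness_similarity_chech max_fitness number_of_similarity (fitness_similarity_chech max_fitness number_of_similarity)

-- ===== LEMMAS AND PROOFS =====

-- length of the run of equal neighbours ending at index m (proof-side characterisation)
def fscRun (xs : List Int) : Nat → Int
  | 0 => 0
  | m + 1 =>
      if PySem.List.pyGetD xs (m : Int) 0 = PySem.List.pyGetD xs ((m : Int) + 1) 0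
      then fscRun xs m + 1 else 0

theorem fsc_foldl_eq_run (xs : List Int) (m : Nat) :
    (PySem.List.pyRange 0 (m : Int) 1).foldl
      (fun sim n =>
        if PySem.List.pyGetD xs n 0 = PySem.List.pyGetD xs (n + 1) 0
        then sim + 1 else 0) 0 = fscRun xs m := by
  induction m with
  | zero => simp [PySem.List.pyRange_one_eq_nil, fscRun]
  | succ m ih =>
      rw [show ((m + 1 : Nat) : Int) = (m : Int) + 1 by push_cast; ring,
        PySem.List.pyRange_one_succ_right (show (0:Int) ≤ (m:Int) by omega),
        List.foldl_append, ih]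
      simp [fscRun]

theorem fsc_loop_eq_run (xs : List Int) (m : Nat) (s : Int) :
    fscAltLoop xs m s = s + fscRun xs m := by
  induction m generalizing s with
  | zero => simp [fscAltLoop, fscRun]
  | succ m ih =>
      by_cases h : PySem.List.pyGetD xs (m : Int) 0 = PySem.List.pyGetD xs ((m : Int) + 1) 0
      · rw [fscAltLoop, if_pos h.symm, ih, fscRun, if_pos h]; ring
      · rw [fscAltLoop, if_neg (fun e => h e.symm), fscRun, if_neg h]; ring

-- ===== VERDICT (by name: the statement is the Claim_ definition above) =====
theorem fitness_similarity_chech_spec : Claim_equal_fitness_similarity_chech := by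
  intro xs k _
  unfold Spec_fitness_similarity_chech fitness_similarity_chech fitness_similarity_chech_alt
  rcases xs with _ | ⟨a, t⟩
  · simp [PySem.List.pyRange_one_eq_nil, fscAltLoop]
  · have hlen : PySem.List.len (a :: t) - 1 = (((a :: t).length - 1 : Nat) : Int) := by
      simp [PySem.List.len_eq]
    rw [hlen, fsc_foldl_eq_run, fsc_loop_eq_run]
    simp
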